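-- pv_equiv track=rewrite | github.com/2jun0/Algorithm | codes/boj/python/16637번 괄호 추가하기.py | calculate_ranges
-- ===== SOURCE A (Python) =====
-- def calculate_ranges(cmds, nums, ranges):
--   '''ranges[idx]씩 묶어서 계산'''
--
--   def _calculate_range(cmds, nums, srt, end):
--     '''nums기준 srt부터 end까지 계산'''
--
--     result = nums[srt]
--     for cmd_idx in range(srt, end):
--       if cmds[cmd_idx] == '*':
--         result *= nums[cmd_idx+1]
--       elif cmds[cmd_idx] == '+':
--         result += nums[cmd_idx+1]
--       elif cmds[cmd_idx] == '-':
--         result -= nums[cmd_idx+1]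
--
--     return result
--
--   new_nums = [_calculate_range(cmds, nums, ranges[0][0], ranges[0][1])]
--   new_cmds = []
--   for srt, end in ranges[1:]:
--     new_nums.append(_calculate_range(cmds, nums, srt, end))
--     new_cmds.append(cmds[srt-1])
--
--   return _calculate_range(new_cmds, new_nums, 0, len(new_nums)-1)
-- ===== SOURCE B (Python) =====
-- def calculate_ranges(cmds, nums, ranges):
--   '''ranges[idx]씩 묶어서 계산 — fused single pass with a dispatch table:
--   each later range's value is folded straight into a running accumulator
--   (no new_nums/new_cmds lists, no second evaluation pass).'''
--
--   OPS = {'*': lambda a, b: a * b, '+': lambda a, b: a + b, '-': lambda a, b: a - b}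
--
--   def eval_range(srt, end):
--     acc = nums[srt]
--     i = srt
--     while i < end:
--       c = cmds[i]
--       if c in OPS:
--         acc = OPS[c](acc, nums[i + 1])
--       i += 1
--     return acc
--
--   srt0, end0 = ranges[0]
--   acc = eval_range(srt0, end0)
--   for srt, end in ranges[1:]:
--     v = eval_range(srt, end)
--     c = cmds[srt - 1]
--     if c in OPS:
--       acc = OPS[c](acc, v)
--   return acc
-- ===== Notes on version B (the rewrite author's own statement) =====
-- stated objective: simpler
-- what changed: Instead of materialising new_nums/new_cmds lists and running the range-evaluator a second time over them, B combines each later range's value into a running accumulator in one fused pass, using a dispatch table (while-loop evaluator) instead of the if/elif chain.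
import Mathlib
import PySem

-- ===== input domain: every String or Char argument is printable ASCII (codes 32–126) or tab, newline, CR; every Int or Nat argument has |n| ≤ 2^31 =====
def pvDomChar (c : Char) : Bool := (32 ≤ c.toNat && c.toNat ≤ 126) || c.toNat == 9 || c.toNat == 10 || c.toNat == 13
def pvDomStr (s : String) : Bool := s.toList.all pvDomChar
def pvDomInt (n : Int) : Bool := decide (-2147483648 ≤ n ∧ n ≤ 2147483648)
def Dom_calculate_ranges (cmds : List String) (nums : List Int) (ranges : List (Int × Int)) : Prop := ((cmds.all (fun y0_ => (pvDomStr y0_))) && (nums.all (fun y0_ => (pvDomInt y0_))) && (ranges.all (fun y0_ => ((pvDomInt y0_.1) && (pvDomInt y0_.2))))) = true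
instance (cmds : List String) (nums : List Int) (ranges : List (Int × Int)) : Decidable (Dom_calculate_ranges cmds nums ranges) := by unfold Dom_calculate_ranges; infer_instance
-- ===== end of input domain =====

-- B fuses A's second evaluation pass into a running accumulator (no new_nums/new_cmds lists),
-- evaluating ranges with a while-loop over a dispatch table; objective: simpler.

-- ===== PORT A =====
-- A's inner helper _calculate_range: left-to-right for-loop over range(srt, end) with an if/elif chain.
def pvCalcRange (cmds : List String) (nums : List Int) (srt fin : Int) : Int :=
  (PySem.List.pyRange srt fin 1).foldl (fun result cmd_idx =>
    if PySem.List.pyGetD cmds cmd_idx "" = "*" then result * PySem.List.pyGetD nums (cmd_idx + 1) 0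
    else if PySem.List.pyGetD cmds cmd_idx "" = "+" then result + PySem.List.pyGetD nums (cmd_idx + 1) 0
    else if PySem.List.pyGetD cmds cmd_idx "" = "-" then result - PySem.List.pyGetD nums (cmd_idx + 1) 0
    else result) (PySem.List.pyGetD nums srt 0)

def calculate_ranges (cmds : List String) (nums : List Int) (ranges : List (Int × Int)) : Int :=
  let r0 := (PySem.List.pyGet? ranges 0).getD (0, 0)
  let st := (ranges.drop 1).foldl
    (fun (st : List Int × List String) se =>
      (st.1 ++ [pvCalcRange cmds nums se.1 se.2], st.2 ++ [PySem.List.pyGetD cmds (se.1 - 1) ""]))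
    ([pvCalcRange cmds nums r0.1 r0.2], [])
  pvCalcRange st.2 st.1 0 ((st.1.length : Int) - 1)

-- ===== PORT B =====
-- B's OPS dispatch table.
def pvOps : PySem.Dict String (Int → Int → Int) :=
  PySem.Dict.mk [("*", fun a b => a * b), ("+", fun a b => a + b), ("-", fun a b => a - b)]

-- B's while-loop evaluator: 'while i < end: if c in OPS: acc = OPS[c](acc, nums[i+1]); i += 1'.
def pvWhileEval (cmds : List String) (nums : List Int) (fin : Int) (acc : Int) (i : Int) : Int :=
  if _h : i < fin then
    let c := PySem.List.pyGetD cmds i ""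
    let acc' := match PySem.Dict.get? pvOps c with
      | some f => f acc (PySem.List.pyGetD nums (i + 1) 0)
      | none => acc
    pvWhileEval cmds nums fin acc' (i + 1)
  else acc
termination_by (fin - i).toNat
decreasing_by omega

def calculate_ranges_alt (cmds : List String) (nums : List Int) (ranges : List (Int × Int)) : Int :=
  let r0 := (PySem.List.pyGet? ranges 0).getD (0, 0)
  (ranges.drop 1).foldl (fun acc se =>
    let v := pvWhileEval cmds nums se.2 (PySem.List.pyGetD nums se.1 0) se.1
    let c := PySem.List.pyGetD cmds (se.1 - 1) ""
    match PySem.Dict.get? pvOps c with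
    | some f => f acc v
    | none => acc)
    (pvWhileEval cmds nums r0.2 (PySem.List.pyGetD nums r0.1 0) r0.1)

-- ===== PRECONDITION & SPEC =====
-- Pre_ excludes exactly the inputs where Python A raises: empty ranges (IndexError on ranges[0]),
-- an out-of-range nums[srt], an out-of-range cmds[i] inside a range, an out-of-range nums[i+1]
-- when cmds[i] is an operator, or an out-of-range cmds[srt-1] for a later range.
def Pre_calculate_ranges (cmds : List String) (nums : List Int) (ranges : List (Int × Int)) : Prop :=
  ranges ≠ [] ∧
  (∀ se ∈ ranges, PySem.Raise.InRange nums.length se.1 ∧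
    (se.2 ≤ se.1 ∨ (-(cmds.length : Int) ≤ se.1 ∧ se.2 ≤ (cmds.length : Int))) ∧
    ∀ i ∈ PySem.List.pyRange se.1 se.2 1,
      PySem.List.pyGetD cmds i "" ∈ (["*", "+", "-"] : List String) →
        PySem.Raise.InRange nums.length (i + 1)) ∧
  (∀ se ∈ ranges.drop 1, PySem.Raise.InRange cmds.length (se.1 - 1))
instance (cmds : List String) (nums : List Int) (ranges : List (Int × Int)) : Decidable (Pre_calculate_ranges cmds nums ranges) := by unfold Pre_calculate_ranges; infer_instance

def pvWitness_calculate_ranges : List String × List Int × (List (Int × Int)) :=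
  (["+", "*"], [1, 2, 3], [(0, 1), (2, 2)])

def Spec_calculate_ranges (cmds : List String) (nums : List Int) (ranges : List (Int × Int)) (out : Int) : Prop := out = calculate_ranges_alt cmds nums ranges
instance (cmds : List String) (nums : List Int) (ranges : List (Int × Int)) (out : Int) : Decidable (Spec_calculate_ranges cmds nums ranges out) := by unfold Spec_calculate_ranges; infer_instance

-- ===== CLAIM (what is proved, stated in full; the proofs are below) =====
def Claim_equal_calculate_ranges : Prop := ∀ (cmds : List String) (nums : List Int) (ranges : List (Int × Int)), Dom_calculate_ranges cmds nums ranges → Pre_calculate_ranges cmds nums ranges → Spec_calculate_ranges cmds nums ranges (calculate_ranges cmds nums ranges)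

-- ===== LEMMAS AND PROOFS =====

-- the dispatch-table lookup is the if/elif chain
theorem pvOpsMatch (c : String) (a b : Int) :
    (match PySem.Dict.get? pvOps c with
      | some f => f a b
      | none => a)
    = (if c = "*" then a * b else if c = "+" then a + b else if c = "-" then a - b else a) := by
  have this1 : PySem.Dict.get? pvOps c =
      (if "*" == c then some (fun a b : Int => a * b)
       else if "+" == c then some (fun a b : Int => a + b)
       else if "-" == c then some (fun a b : Int => a - b)
       else none) := by
    simp only [pvOps, PySem.Dict.get?_mk_cons]
    simp [PySem.Dict.get?]
  rw [this1]; clear this1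
  by_cases h1 : c = "*"
  · subst h1; simp
  · by_cases h2 : c = "+"
    · subst h2; simp
    · by_cases h3 : c = "-"
      · subst h3; simp
      · rw [if_neg, if_neg, if_neg, if_neg h1, if_neg h2, if_neg h3]
        · simp [Ne.symm h3]
        · simp [Ne.symm h2]
        · simp [Ne.symm h1]

-- the while loop is A's foldl over range(i, fin)
theorem pvWhileEval_eq_foldl (cmds : List String) (nums : List Int) (fin : Int) :
    ∀ (n : Nat) (i acc : Int), (fin - i).toNat = n →
      pvWhileEval cmds nums fin acc i
      = (PySem.List.pyRange i fin 1).foldl (fun result cmd_idx =>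
          if PySem.List.pyGetD cmds cmd_idx "" = "*" then result * PySem.List.pyGetD nums (cmd_idx + 1) 0
          else if PySem.List.pyGetD cmds cmd_idx "" = "+" then result + PySem.List.pyGetD nums (cmd_idx + 1) 0
          else if PySem.List.pyGetD cmds cmd_idx "" = "-" then result - PySem.List.pyGetD nums (cmd_idx + 1) 0
          else result) acc := by
  intro n
  induction n with
  | zero =>
      intro i acc h
      have hle : fin ≤ i := by omega
      rw [pvWhileEval, PySem.List.pyRange_one_eq_nil hle]
      simp [not_lt.mpr hle]
  | succ n ih =>
      intro i acc h
      have hlt : i < fin := by omega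
      rw [pvWhileEval, PySem.List.pyRange_one_cons hlt]
      simp only [hlt, dif_pos, List.foldl_cons]
      rw [ih (i + 1) _ (by omega), pvOpsMatch]

theorem pvEval_eq_calc (cmds : List String) (nums : List Int) (srt fin : Int) :
    pvWhileEval cmds nums fin (PySem.List.pyGetD nums srt 0) srt = pvCalcRange cmds nums srt fin := by
  rw [pvCalcRange, pvWhileEval_eq_foldl cmds nums fin ((fin - srt).toNat) srt _ rfl]

-- A's accumulating loop over ranges[1:] just appends the mapped value and the mapped command.
theorem pvFoldA (cmds : List String) (nums : List Int) :
    ∀ (rs : List (Int × Int)) (xs : List Int) (ys : List String),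
      rs.foldl
        (fun (st : List Int × List String) se =>
          (st.1 ++ [pvCalcRange cmds nums se.1 se.2], st.2 ++ [PySem.List.pyGetD cmds (se.1 - 1) ""]))
        (xs, ys)
      = (xs ++ rs.map (fun se => pvCalcRange cmds nums se.1 se.2),
         ys ++ rs.map (fun se => PySem.List.pyGetD cmds (se.1 - 1) "")) := by
  intro rs
  induction rs with
  | nil => intro xs ys; simp
  | cons r rs ih =>
      intro xs ys
      simp [List.foldl_cons, ih]

-- Appending one more command/value column to the final evaluation performs one combine step.
theorem pvStep (cs : List String) (vs : List Int) (c : String) (v : Int) (a : Int)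
    (hcs : cs.length = vs.length) :
    pvCalcRange (cs ++ [c]) (a :: (vs ++ [v])) 0 ((vs.length : Int) + 1)
    = (if c = "*" then pvCalcRange cs (a :: vs) 0 (vs.length : Int) * v
       else if c = "+" then pvCalcRange cs (a :: vs) 0 (vs.length : Int) + v
       else if c = "-" then pvCalcRange cs (a :: vs) 0 (vs.length : Int) - v
       else pvCalcRange cs (a :: vs) 0 (vs.length : Int)) := by
  have hgetc : PySem.List.pyGetD (cs ++ [c]) (vs.length : Int) "" = c := by
    rw [PySem.List.pyGetD_natCast, List.getD_append_right cs [c] "" vs.length (by omega)]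
    simp [hcs]
  have hgetv : PySem.List.pyGetD (a :: (vs ++ [v])) ((vs.length : Int) + 1) 0 = v := by
    rw [show ((vs.length : Int) + 1) = ((vs.length + 1 : Nat) : Int) by push_cast; ring,
        PySem.List.pyGetD_natCast]
    rw [List.getD_cons_succ, List.getD_append_right vs [v] 0 vs.length (le_refl _)]
    simp
  have hinner :
      (PySem.List.pyRange 0 (vs.length : Int) 1).foldl (fun result cmd_idx =>
        if PySem.List.pyGetD (cs ++ [c]) cmd_idx "" = "*" then result * PySem.List.pyGetD (a :: (vs ++ [v])) (cmd_idx + 1) 0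
        else if PySem.List.pyGetD (cs ++ [c]) cmd_idx "" = "+" then result + PySem.List.pyGetD (a :: (vs ++ [v])) (cmd_idx + 1) 0
        else if PySem.List.pyGetD (cs ++ [c]) cmd_idx "" = "-" then result - PySem.List.pyGetD (a :: (vs ++ [v])) (cmd_idx + 1) 0
        else result) (PySem.List.pyGetD (a :: (vs ++ [v])) 0 0)
      = (PySem.List.pyRange 0 (vs.length : Int) 1).foldl (fun result cmd_idx =>
        if PySem.List.pyGetD cs cmd_idx "" = "*" then result * PySem.List.pyGetD (a :: vs) (cmd_idx + 1) 0
        else if PySem.List.pyGetD cs cmd_idx "" = "+" then result + PySem.List.pyGetD (a :: vs) (cmd_idx + 1) 0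
        else if PySem.List.pyGetD cs cmd_idx "" = "-" then result - PySem.List.pyGetD (a :: vs) (cmd_idx + 1) 0
        else result) (PySem.List.pyGetD (a :: vs) 0 0) := by
    rw [show PySem.List.pyGetD (a :: (vs ++ [v])) 0 0 = PySem.List.pyGetD (a :: vs) 0 0 by
      simp [PySem.List.pyGetD_zero_cons]]
    apply PySem.List.foldl_congr_mem
    intro acc i hi
    obtain ⟨h0, hlt⟩ := PySem.List.mem_pyRange_one.mp hi
    have hc' : PySem.List.pyGetD (cs ++ [c]) i "" = PySem.List.pyGetD cs i "" := by
      rw [PySem.List.pyGetD_eq_getElem (cs ++ [c]) "" h0 (by simp; omega),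
          PySem.List.pyGetD_eq_getElem cs "" h0 (by omega)]
      exact List.getElem_append_left (by omega)
    have hv' : PySem.List.pyGetD (a :: (vs ++ [v])) (i + 1) 0
        = PySem.List.pyGetD (a :: vs) (i + 1) 0 := by
      rw [PySem.List.pyGetD_eq_getElem (a :: (vs ++ [v])) 0 (by omega) (by simp; omega),
          PySem.List.pyGetD_eq_getElem (a :: vs) 0 (by omega) (by simp; omega)]
      exact List.getElem_append_left (as := a :: vs) (by simp; omega)
    rw [hc', hv']
  unfold pvCalcRange
  rw [PySem.List.pyRange_one_succ_right (by positivity), List.foldl_append]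
  simp only [List.foldl_cons, List.foldl_nil]
  rw [hinner, hgetc, hgetv]

-- A's final evaluation over the built lists equals B's fused fold.
theorem pvKey (cmds : List String) (nums : List Int) :
    ∀ (rs : List (Int × Int)) (a : Int),
      pvCalcRange (rs.map (fun se => PySem.List.pyGetD cmds (se.1 - 1) ""))
        (a :: rs.map (fun se => pvCalcRange cmds nums se.1 se.2)) 0 (rs.length : Int)
      = rs.foldl (fun acc se =>
          let v := pvWhileEval cmds nums se.2 (PySem.List.pyGetD nums se.1 0) se.1
          let c := PySem.List.pyGetD cmds (se.1 - 1) ""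
          match PySem.Dict.get? pvOps c with
          | some f => f acc v
          | none => acc) a := by
  intro rs
  induction rs using List.reverseRecOn with
  | nil =>
      intro a
      simp [pvCalcRange, PySem.List.pyRange_one_eq_nil, PySem.List.pyGetD_zero_cons]
  | append_singleton rs x ih =>
      intro a
      have hlen : ((rs ++ [x]).length : Int)
          = ((rs.map (fun se => pvCalcRange cmds nums se.1 se.2)).length : Int) + 1 := by simp
      rw [List.map_append, List.map_append, hlen]
      simp only [List.map_cons, List.map_nil]
      rw [pvStep _ _ _ _ _ (by simp)]
      rw [show ((rs.map (fun se => pvCalcRange cmds nums se.1 se.2)).length : Int)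
          = (rs.length : Int) by simp]
      rw [ih a]
      simp [List.foldl_append, pvOpsMatch, pvEval_eq_calc]

-- the main equality, with no precondition needed (the ports are total).
theorem pvMain (cmds : List String) (nums : List Int) (ranges : List (Int × Int)) :
    calculate_ranges cmds nums ranges = calculate_ranges_alt cmds nums ranges := by
  simp only [calculate_ranges, calculate_ranges_alt, pvFoldA, List.nil_append,
    List.singleton_append, List.length_cons, List.length_map]
  rw [show (((ranges.drop 1).length + 1 : Nat) : Int) - 1 = (((ranges.drop 1)).length : Int) by simp]
  rw [pvKey cmds nums (ranges.drop 1) _]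
  rw [pvEval_eq_calc]

-- ===== VERDICT (by name: the statement is the Claim_ definition above) =====
theorem calculate_ranges_spec : Claim_equal_calculate_ranges := by
  intro cmds nums ranges _ _
  unfold Spec_calculate_ranges
  exact pvMain cmds nums ranges
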